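-- pv_equiv track=rewrite | github.com/lixiaoruiusa/Rui7272 | Company/Bloomberg/Candy crush.py | remove_triple
-- ===== SOURCE A (Python) =====
-- def remove_triple(s):
--     finished = True
--     i = len(s) - 1
--     while i >= 2:
--         if s[i] == s[i - 1] == s[i - 2]:
--             s = s[:i - 2] + s[i + 1:]
--             i = i - 3
--             finished = False
--         i -= 1
--     if finished:
--         return s
--     else:
--         return remove_triple(s)
-- ===== SOURCE B (Python) =====
-- def remove_triple(s):
--     stack = []  # (char, count) with count in {1, 2}
--     for c in s:
--         if stack and stack[-1][0] == c:
--             if stack[-1][1] == 2: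
--                 stack.pop()
--             else:
--                 stack[-1] = (c, 2)
--         else:
--             stack.append((c, 1))
--     return ''.join(c * k for c, k in stack)
-- ===== Notes on version B (the rewrite author's own statement) =====
-- stated objective: faster
-- what changed: A repeatedly rescans the string right-to-left, splicing out each adjacent equal triple and restarting until a full pass removes nothing; B makes a single left-to-right pass over a (char,count) stack, popping an entry when its count reaches 3, and renders the stack once at the end.
import Mathlib
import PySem

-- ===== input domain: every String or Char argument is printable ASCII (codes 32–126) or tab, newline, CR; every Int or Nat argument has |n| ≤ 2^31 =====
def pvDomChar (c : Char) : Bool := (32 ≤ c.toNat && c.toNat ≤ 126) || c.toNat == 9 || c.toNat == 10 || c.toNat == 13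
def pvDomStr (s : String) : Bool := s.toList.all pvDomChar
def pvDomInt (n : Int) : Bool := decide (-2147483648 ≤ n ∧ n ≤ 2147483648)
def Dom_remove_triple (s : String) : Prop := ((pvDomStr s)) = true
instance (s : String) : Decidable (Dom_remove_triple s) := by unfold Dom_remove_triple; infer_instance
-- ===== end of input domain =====

-- B replaces A's repeated right-to-left rescans with a single left-to-right pass over a
-- (char, count) stack; a timing run decides whether the speed-up is measurable.

-- ===== PORT A =====
-- A's inner `while i >= 2` loop: state (s, i, finished); Python indexing/slicing is
-- ported with PySem.List.pyGet? / slice.  The Nat argument is fuel making the loop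
-- structurally total: each iteration decreases i by at least 1, so any fuel ≥ i - 1
-- (the outer call passes s.length) runs the loop to completion exactly as Python does.
def loopA : Nat → List Char → Int → Bool → List Char × Bool
  | 0, s, _, finished => (s, finished)
  | fuel + 1, s, i, finished =>
    if 2 ≤ i then
      if PySem.List.pyGet? s i = PySem.List.pyGet? s (i - 1) ∧
         PySem.List.pyGet? s (i - 1) = PySem.List.pyGet? s (i - 2) then
        loopA fuel (PySem.List.slice s none (some (i - 2)) ++ PySem.List.slice s (some (i + 1)) none)
          (i - 3 - 1) false
      else
        loopA fuel s (i - 1) finished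
    else
      (s, finished)

-- A's outer recursion: rerun the pass until `finished`.  Fuel makes it structural:
-- every non-final pass removes at least 3 characters (loopA_length), so s.length + 1
-- passes always suffice; remove_triple passes exactly that.
def goA : Nat → List Char → List Char
  | 0, s => s
  | fuel + 1, s =>
    match loopA s.length s ((s.length : Int) - 1) true with
    | (s', true) => s'
    | (s', false) => goA fuel s'

def remove_triple (s : String) : String := String.ofList (goA (s.toList.length + 1) s.toList)

-- ===== PORT B =====
-- one step of B's loop body: push c onto the (char, count) stack (head = top of stack)
def pushB (st : List (Char × Nat)) (c : Char) : List (Char × Nat) :=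
  match st with
  | (d, k) :: rest =>
    if d = c then (if k = 2 then rest else (c, 2) :: rest)
    else (c, 1) :: (d, k) :: rest
  | [] => [(c, 1)]

def remove_triple_alt (s : String) : String :=
  String.ofList (((s.toList.foldl pushB []).reverse).flatMap (fun p => List.replicate p.2 p.1))

-- ===== PRECONDITION & SPEC =====
def Spec_remove_triple (s : String) (out : String) : Prop := out = remove_triple_alt s
instance (s : String) (out : String) : Decidable (Spec_remove_triple s out) := by unfold Spec_remove_triple; infer_instance

-- ===== CLAIM (what is proved, stated in full; the proofs are below) =====
def Claim_equal_remove_triple : Prop := ∀ (s : String), Dom_remove_triple s → Spec_remove_triple s (remove_triple s)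

-- ===== LEMMAS AND PROOFS =====

-- one pass never lengthens the string, and if it reports `finished = false` starting
-- from `true` it strictly shrank it (so s.length + 1 passes are indeed enough fuel)
lemma loopA_length (fuel : Nat) (s : List Char) (i : Int) (f : Bool) (hi : i < (s.length : Int)) :
    (loopA fuel s i f).1.length ≤ s.length ∧
      ((loopA fuel s i f).2 = false → f = false ∨ (loopA fuel s i f).1.length < s.length) := by
  induction fuel generalizing s i f with
  | zero => exact ⟨le_refl _, fun hf => Or.inl hf⟩
  | succ fuel ih =>
    rw [loopA]
    by_cases h : 2 ≤ i
    · rw [if_pos h]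
      by_cases heq : PySem.List.pyGet? s i = PySem.List.pyGet? s (i - 1) ∧
          PySem.List.pyGet? s (i - 1) = PySem.List.pyGet? s (i - 2)
      · rw [if_pos heq]
        have h2 : (PySem.List.slice s none (some (i - 2)) ++
            PySem.List.slice s (some (i + 1)) none).length = s.length - 3 := by
          rw [PySem.List.slice_to s (by omega), PySem.List.slice_from s (by omega)]
          simp only [List.length_append, List.length_take, List.length_drop]
          omega
        have := ih _ (i - 3 - 1) false (by rw [h2]; omega)
        constructor
        · omega
        · intro _; right; omega
      · rw [if_neg heq]
        exact ih _ (i - 1) f (by omega)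
    · rw [if_neg h]
      exact ⟨le_refl _, fun hf => Or.inl hf⟩

-- rendering of B's stack back to characters (bottom of stack first)
def flatS (st : List (Char × Nat)) : List Char :=
  st.reverse.flatMap (fun p => List.replicate p.2 p.1)

lemma flatS_nil : flatS [] = [] := rfl

lemma flatS_cons (a : Char × Nat) (st : List (Char × Nat)) :
    flatS (a :: st) = flatS st ++ List.replicate a.2 a.1 := by
  simp [flatS]

-- invariant of B's stack: adjacent entries carry distinct characters, counts are 1 or 2
def goodS (st : List (Char × Nat)) : Prop :=
  List.IsChain (fun a b => a.1 ≠ b.1) st ∧ ∀ p ∈ st, p.2 = 1 ∨ p.2 = 2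

lemma goodS_nil : goodS [] := ⟨List.IsChain.nil, by simp⟩

lemma goodS_push (st : List (Char × Nat)) (c : Char) (h : goodS st) : goodS (pushB st c) := by
  obtain ⟨hc, hk⟩ := h
  match st with
  | [] =>
    refine ⟨by simp [pushB, List.isChain_cons], by simp [pushB]⟩
  | (d, k) :: rest =>
    simp only [pushB]
    by_cases hdc : d = c
    · rw [if_pos hdc]
      by_cases h2 : k = 2
      · rw [if_pos h2]
        exact ⟨hc.of_cons, fun p hp => hk p (List.mem_cons_of_mem _ hp)⟩
      · rw [if_neg h2]
        refine ⟨?_, ?_⟩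
        · rw [List.isChain_cons] at hc ⊢
          exact ⟨by subst hdc; exact hc.1, hc.2⟩
        · intro p hp
          rcases List.mem_cons.1 hp with h | h
          · subst h; right; rfl
          · exact hk p (List.mem_cons_of_mem _ h)
    · rw [if_neg hdc]
      refine ⟨List.isChain_cons.2 ⟨?_, hc⟩, ?_⟩
      · intro b hb
        simp only [List.head?_cons, Option.mem_def, Option.some.injEq] at hb
        subst hb
        exact fun he => hdc he.symm
      · intro p hp
        rcases List.mem_cons.1 hp with h | h
        · subst h; left; rfl
        · exact hk p h

lemma goodS_foldl (l : List Char) (st : List (Char × Nat)) (h : goodS st) :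
    goodS (l.foldl pushB st) := by
  induction l generalizing st with
  | nil => exact h
  | cons c l ih => exact ih _ (goodS_push st c h)

-- a character distinct from the top of the stack is pushed with count 1
lemma pushB_fresh (st : List (Char × Nat)) (c : Char)
    (hh : ∀ p ∈ st.head?, p.1 ≠ c) : pushB st c = (c, 1) :: st := by
  match st with
  | [] => rfl
  | (d, k) :: rest =>
    have hd : d ≠ c := hh (d, k) (by simp)
    simp only [pushB, if_neg hd]

-- pushing the same character three times onto a good stack is the identity
lemma push3_id (st : List (Char × Nat)) (c : Char) (h : goodS st) :
    pushB (pushB (pushB st c) c) c = st := by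
  obtain ⟨hc, hk⟩ := h
  match st with
  | [] => simp [pushB]
  | (d, k) :: rest =>
    by_cases hdc : d = c
    · subst hdc
      have hhead : ∀ p ∈ rest.head?, p.1 ≠ d := by
        intro p hp
        have := (List.isChain_cons.1 hc).1 p hp
        exact fun he => this he.symm
      have s1 : pushB ((d, 1) :: rest) d = (d, 2) :: rest := by simp [pushB]
      have s2 : pushB ((d, 2) :: rest) d = rest := by simp [pushB]
      rcases hk (d, k) (by simp) with h1 | h2
      -- k = 1 : (d,1) → (d,2) → pop → push fresh
      · simp only at h1; subst h1
        rw [s1, s2, pushB_fresh rest d hhead]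
      -- k = 2 : pop → push fresh → (d,2)
      · simp only at h2; subst h2
        rw [s2, pushB_fresh rest d hhead, s1]
    · simp [pushB, hdc]

-- deleting an adjacent triple does not change B's stack
lemma foldl_del (u v : List Char) (c : Char) (st : List (Char × Nat)) (h : goodS st) :
    (u ++ c :: c :: c :: v).foldl pushB st = (u ++ v).foldl pushB st := by
  have he : (u ++ c :: c :: c :: v) = (u ++ [c, c, c]) ++ v := by simp
  rw [he, List.foldl_append, List.foldl_append, List.foldl_append]
  simp only [List.foldl]
  rw [push3_id _ _ (goodS_foldl u st h)]

-- no adjacent triple, as a decomposition statement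
def NT (l : List Char) : Prop := ∀ u (c : Char) v, l ≠ u ++ c :: c :: c :: v

-- on triple-free input B's stack renders back to the input
lemma flatS_foldl (l p : List Char) (st : List (Char × Nat)) (hg : goodS st)
    (hf : flatS st = p) (hnt : NT (p ++ l)) : flatS (l.foldl pushB st) = p ++ l := by
  induction l generalizing p st with
  | nil => simpa using hf
  | cons c l ih =>
    simp only [List.foldl]
    have hstep : flatS (pushB st c) = p ++ [c] := by
      match st with
      | [] =>
        simp only [flatS_nil] at hf; subst hf
        simp [pushB, flatS]
      | (d, k) :: rest =>
        by_cases hdc : d = c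
        · subst hdc
          rcases hg.2 (d, k) (by simp) with h1 | h2
          · simp only at h1; subst h1
            have s1 : pushB ((d, 1) :: rest) d = (d, 2) :: rest := by simp [pushB]
            rw [s1, flatS_cons]
            rw [flatS_cons] at hf
            simp only [List.replicate] at hf ⊢
            rw [← hf]; simp
          · -- k = 2 : popping would mean p ends in [d,d] and c = d: a triple, contradiction
            exfalso
            simp only at h2; subst h2
            rw [flatS_cons] at hf
            exact hnt (flatS rest) d l (by rw [← hf]; simp [List.replicate])
        · rw [pushB_fresh _ _ (by intro q hq; simp only [List.head?_cons,
            Option.mem_def, Option.some.injEq] at hq; subst hq; exact hdc)]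
          rw [flatS_cons, hf]
          simp [List.replicate]
    have := ih (p ++ [c]) (pushB st c) (goodS_push st c hg) hstep
      (by simpa [List.append_assoc] using hnt)
    simpa [List.append_assoc] using this
  
-- A's in-range triple test yields a genuine decomposition
lemma triple_decomp (s : List Char) (i : Int) (h2 : 2 ≤ i) (hl : i < (s.length : Int))
    (he : PySem.List.pyGet? s i = PySem.List.pyGet? s (i - 1) ∧
          PySem.List.pyGet? s (i - 1) = PySem.List.pyGet? s (i - 2)) :
    ∃ c, s = s.take (i.toNat - 2) ++ c :: c :: c :: s.drop (i.toNat + 1) := by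
  obtain ⟨he1, he2⟩ := he
  have hn2 : 2 ≤ i.toNat := by omega
  have hnl : i.toNat < s.length := by omega
  rw [PySem.List.pyGet?_of_nonneg s (by omega), PySem.List.pyGet?_of_nonneg s (by omega)] at he1
  rw [PySem.List.pyGet?_of_nonneg s (by omega), PySem.List.pyGet?_of_nonneg s (by omega)] at he2
  have e1 : (i - 1).toNat = i.toNat - 1 := by omega
  have e2 : (i - 2).toNat = i.toNat - 2 := by omega
  rw [e1] at he1 he2
  rw [e2] at he2
  rw [List.getElem?_eq_getElem hnl, List.getElem?_eq_getElem (by omega : i.toNat - 1 < s.length)] at he1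
  rw [List.getElem?_eq_getElem (by omega : i.toNat - 1 < s.length),
      List.getElem?_eq_getElem (by omega : i.toNat - 2 < s.length)] at he2
  have g1 : s[i.toNat]'hnl = s[i.toNat - 1]'(by omega) := Option.some.inj he1
  have g2 : s[i.toNat - 1]'(by omega) = s[i.toNat - 2]'(by omega) := Option.some.inj he2
  refine ⟨s[i.toNat - 2]'(by omega), ?_⟩
  have d0 : s.drop (i.toNat - 2) = s[i.toNat - 2]'(by omega) :: s.drop (i.toNat - 1) := by
    rw [List.drop_eq_getElem_cons (by omega), show i.toNat - 2 + 1 = i.toNat - 1 from by omega]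
  have d1 : s.drop (i.toNat - 1) = s[i.toNat - 1]'(by omega) :: s.drop i.toNat := by
    rw [List.drop_eq_getElem_cons (by omega), show i.toNat - 1 + 1 = i.toNat from by omega]
  have d2 : s.drop i.toNat = s[i.toNat]'hnl :: s.drop (i.toNat + 1) :=
    List.drop_eq_getElem_cons hnl
  conv_lhs => rw [← List.take_append_drop (i.toNat - 2) s]
  rw [d0, d1, d2, g1, g2]

-- one pass of A preserves B's stack
lemma loopA_norm (fuel : Nat) (s : List Char) (i : Int) (f : Bool) (hi : i < (s.length : Int)) :
    ((loopA fuel s i f).1).foldl pushB [] = s.foldl pushB [] := by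
  induction fuel generalizing s i f with
  | zero => rfl
  | succ fuel ih =>
    rw [loopA]
    by_cases h : 2 ≤ i
    · rw [if_pos h]
      by_cases heq : PySem.List.pyGet? s i = PySem.List.pyGet? s (i - 1) ∧
          PySem.List.pyGet? s (i - 1) = PySem.List.pyGet? s (i - 2)
      · rw [if_pos heq]
        obtain ⟨c, hdec⟩ := triple_decomp s i h hi heq
        have hs2 : PySem.List.slice s none (some (i - 2)) ++ PySem.List.slice s (some (i + 1)) none
            = s.take (i.toNat - 2) ++ s.drop (i.toNat + 1) := by
          rw [PySem.List.slice_to s (by omega), PySem.List.slice_from s (by omega)]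
          congr 2
          · omega
          · omega
        have hlen : (s.take (i.toNat - 2) ++ s.drop (i.toNat + 1)).length = s.length - 3 := by
          conv_rhs => rw [hdec]
          simp
          omega
        rw [ih _ (i - 3 - 1) false (by rw [hs2, hlen]; omega), hs2]
        conv_rhs => rw [hdec]
        exact (foldl_del _ _ _ _ goodS_nil).symm
      · rw [if_neg heq]
        exact ih _ (i - 1) f (by omega)
    · rw [if_neg h]

-- a pass with enough fuel that reports `finished = true` left s unchanged and found no triple up to i
lemma loopA_true (fuel : Nat) (s : List Char) (i : Int) (f : Bool) (hfuel : i - 1 ≤ (fuel : Int))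
    (h : (loopA fuel s i f).2 = true) :
    f = true ∧ (loopA fuel s i f).1 = s ∧
      ∀ j : Int, 2 ≤ j → j ≤ i →
        ¬(PySem.List.pyGet? s j = PySem.List.pyGet? s (j - 1) ∧
          PySem.List.pyGet? s (j - 1) = PySem.List.pyGet? s (j - 2)) := by
  induction fuel generalizing s i f with
  | zero =>
    rw [loopA] at h ⊢
    refine ⟨h, rfl, fun j hj2 hji => ?_⟩
    exfalso
    simp only [Nat.cast_zero] at hfuel
    omega
  | succ fuel ih =>
    rw [loopA] at h ⊢
    by_cases hge : 2 ≤ i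
    · rw [if_pos hge] at h ⊢
      by_cases heq : PySem.List.pyGet? s i = PySem.List.pyGet? s (i - 1) ∧
          PySem.List.pyGet? s (i - 1) = PySem.List.pyGet? s (i - 2)
      · rw [if_pos heq] at h ⊢
        exact absurd (ih _ (i - 3 - 1) false (by omega) h).1 (by decide)
      · rw [if_neg heq] at h ⊢
        obtain ⟨h1, h2, h3⟩ := ih _ (i - 1) f (by omega) h
        refine ⟨h1, h2, fun j hj2 hji => ?_⟩
        by_cases hji' : j = i
        · subst hji'; exact heq
        · exact h3 j hj2 (by omega)
    · rw [if_neg hge] at h ⊢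
      exact ⟨h, rfl, fun j hj2 hji => absurd (le_trans hj2 hji) hge⟩

-- index-free consequence: a full finished pass certifies the absence of any triple
lemma noTriple_of_scan (s : List Char)
    (h : ∀ j : Int, 2 ≤ j → j ≤ (s.length : Int) - 1 →
        ¬(PySem.List.pyGet? s j = PySem.List.pyGet? s (j - 1) ∧
          PySem.List.pyGet? s (j - 1) = PySem.List.pyGet? s (j - 2))) : NT s := by
  intro u c v heq
  subst heq
  have p2 : PySem.List.pyGet? (u ++ c :: c :: c :: v) ((u.length : Int) + 2) = some c := by
    simpa using PySem.List.pyGet?_append_right u (c :: c :: c :: v) 2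
  have p1 : PySem.List.pyGet? (u ++ c :: c :: c :: v) ((u.length : Int) + 1) = some c := by
    simpa using PySem.List.pyGet?_append_right u (c :: c :: c :: v) 1
  have p0 : PySem.List.pyGet? (u ++ c :: c :: c :: v) ((u.length : Int)) = some c := by
    have h0 := PySem.List.pyGet?_append_right u (c :: c :: c :: v) 0
    simp only [Nat.cast_zero, add_zero] at h0
    exact h0
  have e2 : (u.length : Int) + 2 - 1 = ((u.length : Int) + 1) := by ring
  have e3 : (u.length : Int) + 2 - 2 = ((u.length : Int)) := by ring
  refine h ((u.length : Int) + 2) (by omega) (by simp; omega) ⟨?_, ?_⟩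
  · rw [e2, p2, p1]
  · rw [e2, e3, p1, p0]

lemma goA_eq (fuel : Nat) (s : List Char) (h : s.length < fuel) :
    goA fuel s = flatS (s.foldl pushB []) := by
  induction fuel generalizing s with
  | zero => omega
  | succ fuel ih =>
    rw [goA]
    rcases hm : loopA s.length s ((s.length : Int) - 1) true with ⟨s', fin⟩
    cases fin with
    | true =>
      obtain ⟨-, h1, h2⟩ := loopA_true s.length s ((s.length : Int) - 1) true (by omega)
        (by rw [hm])
      rw [hm] at h1
      subst h1
      have hnt : NT s' := noTriple_of_scan s' h2
      show s' = _
      exact (flatS_foldl s' [] [] goodS_nil rfl (by simpa using hnt)).symm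
    | false =>
      have hlen := loopA_length s.length s ((s.length : Int) - 1) true (by omega)
      rw [hm] at hlen
      have hn := loopA_norm s.length s ((s.length : Int) - 1) true (by omega)
      rw [hm] at hn
      simp only at hn hlen
      have hs' : s'.length < s.length := by
        rcases hlen.2 trivial with hc | hc
        · exact absurd hc (by decide)
        · exact hc
      show goA fuel s' = _
      rw [ih s' (by omega), hn]

-- ===== VERDICT (by name: the statement is the Claim_ definition above) =====
theorem remove_triple_spec : Claim_equal_remove_triple := by
  intro s _
  unfold Spec_remove_triple remove_triple remove_triple_alt
  rw [goA_eq (s.toList.length + 1) s.toList (by omega)]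
  rfl
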